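-- pv_equiv track=rewrite | github.com/mattmeyers/advent-of-code | 2025/d04/main.py | part2
-- ===== SOURCE A (Python) =====
-- def check_neighbor(grid: list[list[str]], row: int, col: int) -> int:
--     if row < 0 or row >= len(grid) or col < 0 or col >= len(grid[0]):
--         return 0
--
--     return 1 if grid[row][col] == '@' else 0
--
-- def part2(input: list[list[str]]) -> int:
--     total = 0
--     removals = []
--     while True:
--         for row, line in enumerate(input):
--             for col, c in enumerate(line):
--                 if c == '.':
--                     continue
--
--                 neighbors = sum([
--                     check_neighbor(input, row-1, col-1),
--                     check_neighbor(input, row-1, col),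
--                     check_neighbor(input, row-1, col+1),
--                     check_neighbor(input, row, col-1),
--                     check_neighbor(input, row, col+1),
--                     check_neighbor(input, row+1, col-1),
--                     check_neighbor(input, row+1, col),
--                     check_neighbor(input, row+1, col+1),
--                 ])
--
--                 if neighbors < 4:
--                     removals.append((row, col))
--
--         if len(removals) == 0:
--             break
--
--         for roll in removals:
--             input[roll[0]][roll[1]] = '.'
--
--         total += len(removals)
--         removals = []
--
--     return total
-- ===== SOURCE B (Python) =====
-- def part2(input: list[list[str]]) -> int:
--     # Incremental (queue-based) peeling instead of A's repeated full-grid rounds: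
--     # only '@' cells inside the grid's width W (= len(input[0]), as A's bounds check
--     # reads it) can ever feed a neighbor count, so first compute the stable core of
--     # the '@' cells by worklist peeling -- pop a candidate, recheck its live '@'
--     # neighbor count (8 membership tests), drop it if < 4 and enqueue its still-live
--     # neighbors -- then count, in one closed-form pass, the cells that survive:
--     # exactly those with at least 4 core neighbors.  Each removal enqueues at most 8
--     # cells, so the loop is linear in the grid size; B never mutates its argument
--     # (A blanks cells in place).
--     W = len(input[0]) if input else 0
--     alive = [(r, c) for r, line in enumerate(input) for c, ch in enumerate(line) if ch != '.']
--     ats_list = [(r, c) for r, line in enumerate(input) for c, ch in enumerate(line)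
--                 if ch == '@' and c < W]
--     S = set(ats_list)
--     work = list(ats_list)
--     i = 0
--     while i < len(work):
--         r, c = work[i]
--         i += 1
--         if (r, c) not in S:
--             continue
--         # nb = sum of the 8 neighbor-membership indicators
--         nb = (((r-1, c-1) in S) + ((r-1, c) in S) + ((r-1, c+1) in S)
--               + ((r, c-1) in S) + ((r, c+1) in S)
--               + ((r+1, c-1) in S) + ((r+1, c) in S) + ((r+1, c+1) in S))
--         if nb >= 4:
--             continue
--         S.remove((r, c))
--         for q in ((r-1, c-1), (r-1, c), (r-1, c+1), (r, c-1), (r, c+1),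
--                   (r+1, c-1), (r+1, c), (r+1, c+1)):
--             if q in S:
--                 work.append(q)
--     survivors = 0
--     for r, c in alive:
--         nb = (((r-1, c-1) in S) + ((r-1, c) in S) + ((r-1, c+1) in S)
--               + ((r, c-1) in S) + ((r, c+1) in S)
--               + ((r+1, c-1) in S) + ((r+1, c) in S) + ((r+1, c+1) in S))
--         if nb >= 4:
--             survivors += 1
--     return len(alive) - survivors
-- ===== Notes on version B (the rewrite author's own statement) =====
-- stated objective: alternative
-- what changed: B replaces A's repeated full-grid removal rounds (rescan every cell, blank the batch, repeat) by one incremental worklist peeling of the in-width '@' cells -- pop a candidate, recheck its live-neighbor count, remove it and enqueue its neighbors if below 4 -- followed by a single closed-form pass counting the cells with >= 4 core neighbors; B never rescans or mutates the grid. A raises IndexError on ragged grids where a probed neighbor slot inside len(input) x len(input[0]) is missing from a shorter row; Pre_ excludes exactly those inputs.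
import Mathlib
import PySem

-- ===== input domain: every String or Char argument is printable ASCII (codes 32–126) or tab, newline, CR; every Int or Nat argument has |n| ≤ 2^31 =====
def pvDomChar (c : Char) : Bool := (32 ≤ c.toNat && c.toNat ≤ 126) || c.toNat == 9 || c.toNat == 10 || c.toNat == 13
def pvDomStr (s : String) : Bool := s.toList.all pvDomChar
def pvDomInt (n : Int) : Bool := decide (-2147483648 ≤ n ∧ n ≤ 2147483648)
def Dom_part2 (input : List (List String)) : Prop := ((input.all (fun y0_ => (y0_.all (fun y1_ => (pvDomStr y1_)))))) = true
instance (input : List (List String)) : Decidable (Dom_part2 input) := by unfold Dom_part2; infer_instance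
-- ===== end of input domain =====

-- B replaces A's repeated full-grid removal rounds by a single incremental worklist
-- peeling of the '@' cells (remove a cell whose live-neighbor count drops below 4,
-- enqueue its neighbors) plus one closed-form survivor count; equivalence is about
-- the RETURN value only (Python A mutates its argument in place, B does not).

-- ===== PORT A =====
-- check_neighbor: the out-of-range tests short-circuit exactly as Python's 'or' chain does;
-- the inner pyGetD default is only reached where Python raises IndexError (ragged grids,
-- excluded by Pre_part2).
def checkNeighbor (grid : List (List String)) (row col : Int) : Int :=
  if row < 0 ∨ (grid.length : Int) ≤ row then 0
  else if col < 0 ∨ ((grid.headD []).length : Int) ≤ col then 0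
  else if PySem.List.pyGetD (PySem.List.pyGetD grid row []) col "" = "@" then 1 else 0

-- neighbors = sum([check_neighbor(...), ...]) for the 8 offsets, in Python's order
def nbA (g : List (List String)) (row col : Int) : Int :=
  ([checkNeighbor g (row-1) (col-1), checkNeighbor g (row-1) col, checkNeighbor g (row-1) (col+1),
    checkNeighbor g row (col-1), checkNeighbor g row (col+1),
    checkNeighbor g (row+1) (col-1), checkNeighbor g (row+1) col, checkNeighbor g (row+1) (col+1)]).sum

-- the nested 'for row, line in enumerate(input): for col, c in enumerate(line): …' scan
def removalsOf (g : List (List String)) : List (Int × Int) :=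
  (PySem.List.enumerate g).foldl (fun acc rl =>
    (PySem.List.enumerate rl.2).foldl (fun acc2 cc =>
      if cc.2 = "." then acc2
      else if nbA g rl.1 cc.1 < 4 then acc2 ++ [(rl.1, cc.1)] else acc2) acc) []

-- 'for roll in removals: input[roll[0]][roll[1]] = "."'
def applyRemovals (g : List (List String)) (rem : List (Int × Int)) : List (List String) :=
  rem.foldl (fun g p =>
    PySem.List.pySetD g p.1 (PySem.List.pySetD (PySem.List.pyGetD g p.1 []) p.2 ".")) g

-- the 'while True' loop; fuel (cells+1) strictly exceeds the number of iterations, since each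
-- non-breaking iteration blanks at least one non-'.' cell
def part2Loop : Nat → List (List String) → Int → Int
  | 0, _, total => total
  | f+1, g, total =>
    let rem := removalsOf g
    if rem.length = 0 then total
    else part2Loop f (applyRemovals g rem) (total + (rem.length : Int))

def part2 (input : List (List String)) : Int :=
  part2Loop ((input.map List.length).sum + 1) input 0

-- ===== PORT B =====
-- the 8 neighbor offsets, in Source B's iteration order 'for dr in (-1,0,1) for dc in (-1,0,1) if (dr,dc) != (0,0)'
def offs : List (Int × Int) := [(-1,-1),(-1,0),(-1,1),(0,-1),(0,1),(1,-1),(1,0),(1,1)]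

-- alive = [(r, c) … if ch != '.'] (row-major list)
def aliveOf (g : List (List String)) : List (Int × Int) :=
  (PySem.List.enumerate g).flatMap (fun rl =>
    (PySem.List.enumerate rl.2).filterMap (fun cc =>
      if cc.2 ≠ "." then some (rl.1, cc.1) else none))

-- ats_list = [(r, c) … if ch == '@' and c < W], W = len(input[0]) if input else 0
def atsListOf (g : List (List String)) : List (Int × Int) :=
  (PySem.List.enumerate g).flatMap (fun rl =>
    (PySem.List.enumerate rl.2).filterMap (fun cc =>
      if cc.2 = "@" ∧ cc.1 < ((g.headD []).length : Int) then some (rl.1, cc.1) else none))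

-- sum((r+dr, c+dc) in S for dr in (-1,0,1) for dc in (-1,0,1) if (dr,dc) != (0,0))
def nbB (S : PySem.Set (Int × Int)) (r c : Int) : Int :=
  (offs.map (fun d => if PySem.Set.contains S (r + d.1, c + d.2) then (1:Int) else 0)).sum

-- the worklist loop 'while i < len(work): …' — pop the head (≡ the index i), skip dead or
-- well-supported cells, otherwise remove (S.remove on a present element = Set.discard) and
-- enqueue the still-live neighbors; fuel 9*|S|+|work|+1 strictly exceeds the iteration count
def peelLoop : Nat → PySem.Set (Int × Int) → List (Int × Int) → PySem.Set (Int × Int)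
  | 0, S, _ => S
  | _+1, S, [] => S
  | f+1, S, p :: rest =>
    if PySem.Set.contains S p = false then peelLoop f S rest
    else if 4 ≤ nbB S p.1 p.2 then peelLoop f S rest
    else
      let S' := PySem.Set.discard S p
      peelLoop f S' (rest ++ offs.filterMap (fun d =>
        if PySem.Set.contains S' (p.1 + d.1, p.2 + d.2) then some (p.1 + d.1, p.2 + d.2)
        else none))

def part2_alt (input : List (List String)) : Int :=
  let alive := aliveOf input
  let atsL := atsListOf input
  let S := peelLoop (10 * atsL.length + 1) (PySem.Set.ofList atsL) atsL
  (alive.length : Int) - ((alive.filter (fun p => decide (4 ≤ nbB S p.1 p.2))).length : Int)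

-- ===== PRECONDITION & SPEC =====
-- Pre_part2 holds exactly when A returns: A raises IndexError iff some non-'.' cell has an
-- in-bounds neighbor slot (row < len(input), col < len(input[0])) missing from its (shorter)
-- row, and every such probe already happens in the first round.
-- all neighbor slots of cell (r, c) that A probes (inside len(input) × len(input[0])) exist
def probesOk (input : List (List String)) (r c : Nat) : Bool :=
  decide (∀ r' < input.length, ∀ c' < (input.headD []).length,
    (r ≤ r' + 1 ∧ r' ≤ r + 1 ∧ c ≤ c' + 1 ∧ c' ≤ c + 1) →
      c' < (input.getD r' []).length)

def Pre_part2 (input : List (List String)) : Prop :=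
  ∀ r < input.length, ∀ c < (input.getD r []).length,
    (input.getD r []).getD c "" ≠ "." → probesOk input r c = true
instance (input : List (List String)) : Decidable (Pre_part2 input) := by
  unfold Pre_part2; infer_instance

def pvWitness_part2 : List (List String) := [["@", "."], [".", "@"]]

def Spec_part2 (input : List (List String)) (out : Int) : Prop := out = part2_alt input
instance (input : List (List String)) (out : Int) : Decidable (Spec_part2 input out) := by
  unfold Spec_part2; infer_instance

-- ===== CLAIM (what is proved, stated in full; the proofs are below) =====
def Claim_equal_part2 : Prop :=
  ∀ (input : List (List String)), Dom_part2 input → Pre_part2 input → Spec_part2 input (part2 input)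

-- ===== LEMMAS AND PROOFS =====

-- the round-based removal process on coordinate collections (alive list, '@' set), a
-- proof-side stepping stone: A's grid loop is first shown equal to it, and it is then
-- shown to compute B's closed-form answer
def roundLoop : Nat → List (Int × Int) → PySem.Set (Int × Int) → Int → Int
  | 0, _, _, total => total
  | f+1, alive, ats, total =>
    if alive.isEmpty then total
    else
      let rem := alive.filter (fun p => decide (nbB ats p.1 p.2 < 4))
      if rem.isEmpty then total
      else
        let removed := PySem.Set.ofList rem
        roundLoop f (alive.filter (fun p => !(PySem.Set.contains removed p)))
          (PySem.Set.diff ats removed) (total + (rem.length : Int))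

-- the '@' set A's bounds-checked lookups actually see
def atsOf (g : List (List String)) : PySem.Set (Int × Int) := PySem.Set.ofList (atsListOf g)

-- cell access with Nat indices, and the index normal forms of the two comprehensions
def cellN (g : List (List String)) (r c : Nat) : String := (g.getD r []).getD c ""

def aliveIdx (g : List (List String)) : List (Int × Int) :=
  (PySem.List.pyRange 0 (PySem.List.len g)).flatMap (fun r =>
    (PySem.List.pyRange 0 (PySem.List.len (PySem.List.pyGetD g r []))).filterMap (fun c =>
      if PySem.List.pyGetD (PySem.List.pyGetD g r []) c "" ≠ "." then some (r, c) else none))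

lemma filterMap_ite_eq_map_filter {α β : Type} (l : List α) (p : α → Prop) [DecidablePred p] (f : α → β) :
    l.filterMap (fun x => if p x then some (f x) else none) = (l.filter (fun x => decide (p x))).map f := by
  induction l with
  | nil => rfl
  | cons x t ih => by_cases h : p x <;> simp [h, ih]

lemma aliveOf_eq_idx (g : List (List String)) : aliveOf g = aliveIdx g := by
  unfold aliveOf aliveIdx
  rw [PySem.List.enumerate_eq_map_pyRange g [], List.flatMap_map]
  refine List.flatMap_congr (fun r hr => ?_)
  rw [PySem.List.enumerate_eq_map_pyRange (PySem.List.pyGetD g r []) "", List.filterMap_map]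
  rfl

lemma mem_aliveOf (g : List (List String)) (p : Int × Int) :
    p ∈ aliveOf g ↔ ∃ r c : Nat, p = ((r : Int), (c : Int)) ∧ r < g.length ∧
      c < (g.getD r []).length ∧ cellN g r c ≠ "." := by
  rw [aliveOf_eq_idx]
  unfold aliveIdx
  simp only [List.mem_flatMap, List.mem_filterMap, PySem.List.mem_pyRange_one,
    PySem.List.len_eq]
  constructor
  · rintro ⟨r, ⟨hr0, hrl⟩, c, ⟨hc0, hcl⟩, hif⟩
    by_cases h : PySem.List.pyGetD (PySem.List.pyGetD g r []) c "" ≠ "."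
    · rw [if_pos h] at hif
      refine ⟨r.toNat, c.toNat, ?_, ?_, ?_, ?_⟩
      · cases hif; simp [Int.toNat_of_nonneg hr0, Int.toNat_of_nonneg hc0]
      · omega
      · rw [PySem.List.pyGetD_of_nonneg _ _ hr0] at hcl
        omega
      · unfold cellN
        rw [PySem.List.pyGetD_of_nonneg _ _ hr0, PySem.List.pyGetD_of_nonneg _ _ hc0] at h
        simpa using h
    · simp [h] at hif
  · rintro ⟨r, c, rfl, hr, hc, hne⟩
    refine ⟨(r:Int), ⟨by positivity, by exact_mod_cast hr⟩, (c:Int), ⟨by positivity, ?_⟩, ?_⟩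
    · rw [PySem.List.pyGetD_natCast]; exact_mod_cast hc
    · have : PySem.List.pyGetD (PySem.List.pyGetD g (r:Int) []) (c:Int) "" = cellN g r c := by
        simp [cellN, PySem.List.pyGetD_natCast]
      rw [this, if_pos hne]

lemma mem_atsOf (g : List (List String)) (p : Int × Int) :
    p ∈ atsOf g ↔ ∃ r c : Nat, p = ((r : Int), (c : Int)) ∧ r < g.length ∧
      c < (g.getD r []).length ∧ c < (g.headD []).length ∧ cellN g r c = "@" := by
  unfold atsOf atsListOf
  rw [PySem.Set.mem_ofList]
  rw [PySem.List.enumerate_eq_map_pyRange g [], List.flatMap_map]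
  simp only [List.mem_flatMap, List.mem_filterMap, PySem.List.mem_pyRange_one, PySem.List.len_eq]
  constructor
  · rintro ⟨r, ⟨hr0, hrl⟩, cc, hcc, hif⟩
    rw [PySem.List.enumerate_eq_map_pyRange (PySem.List.pyGetD g r []) "", List.mem_map] at hcc
    obtain ⟨c, hcr, rfl⟩ := hcc
    rw [PySem.List.mem_pyRange_one] at hcr
    obtain ⟨hc0, hcl⟩ := hcr
    by_cases h : PySem.List.pyGetD (PySem.List.pyGetD g r []) c "" = "@"
        ∧ c < ((g.headD []).length : Int)
    · rw [if_pos h] at hif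
      refine ⟨r.toNat, c.toNat, ?_, by omega, ?_, ?_, ?_⟩
      · cases hif; simp [Int.toNat_of_nonneg hr0, Int.toNat_of_nonneg hc0]
      · rw [PySem.List.pyGetD_of_nonneg _ _ hr0] at hcl
        rw [PySem.List.len_eq] at hcl; omega
      · obtain ⟨-, hW⟩ := h
        omega
      · obtain ⟨h, -⟩ := h
        unfold cellN
        rw [PySem.List.pyGetD_of_nonneg _ _ hr0, PySem.List.pyGetD_of_nonneg _ _ hc0] at h
        simpa using h
    · rw [if_neg h] at hif; exact absurd hif (by simp)
  · rintro ⟨r, c, rfl, hr, hc, hW, heq⟩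
    refine ⟨(r:Int), ⟨by positivity, by exact_mod_cast hr⟩, ((c:Int), cellN g r c), ?_, ?_⟩
    · rw [PySem.List.enumerate_eq_map_pyRange (PySem.List.pyGetD g (r:Int) []) "", List.mem_map]
      refine ⟨(c:Int), ?_, ?_⟩
      · rw [PySem.List.mem_pyRange_one, PySem.List.pyGetD_natCast, PySem.List.len_eq]
        constructor; · positivity
        exact_mod_cast hc
      · simp [cellN, PySem.List.pyGetD_natCast]
    · rw [if_pos ⟨heq, by simpa using hW⟩]

lemma nodup_aliveOf (g : List (List String)) : (aliveOf g).Nodup := by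
  rw [aliveOf_eq_idx]
  unfold aliveIdx
  rw [List.nodup_flatMap]
  constructor
  · intro r _
    rw [filterMap_ite_eq_map_filter]
    exact ((PySem.List.nodup_pyRange_one _ _).filter _).map (fun a b h => by simpa using h)
  · have hlt := PySem.List.pairwise_lt_pyRange_one (a := 0) (b := PySem.List.len g)
    refine hlt.imp (fun {r r'} hrr => ?_)
    intro p hp hp'
    simp only at hp hp'
    rw [filterMap_ite_eq_map_filter, List.mem_map] at hp hp'
    obtain ⟨c, _, rfl⟩ := hp
    obtain ⟨c', _, h'⟩ := hp'
    exact absurd (congrArg Prod.fst h') (by simp; omega)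

lemma checkNeighbor_eq (g : List (List String)) (x y : Int) :
    checkNeighbor g x y = if (x, y) ∈ atsOf g then 1 else 0 := by
  unfold checkNeighbor
  by_cases h1 : x < 0 ∨ (g.length : Int) ≤ x
  · rw [if_pos h1, if_neg]
    intro hm
    rw [mem_atsOf] at hm
    obtain ⟨r, c, heq, hr, -, -, -⟩ := hm
    have hx : x = (r : Int) := congrArg Prod.fst heq
    omega
  · rw [if_neg h1]
    push Not at h1
    obtain ⟨hx0, hxl⟩ := h1
    by_cases h2 : y < 0 ∨ ((g.headD []).length : Int) ≤ y
    · rw [if_pos h2, if_neg]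
      intro hm
      rw [mem_atsOf] at hm
      obtain ⟨r, c, heq, -, -, hW, -⟩ := hm
      have hy : y = (c : Int) := congrArg Prod.snd heq
      omega
    · rw [if_neg h2]
      push Not at h2
      obtain ⟨hy0, hyl⟩ := h2
      by_cases h3 : y < ((g.getD x.toNat []).length : Int)
      · have hcell : PySem.List.pyGetD (PySem.List.pyGetD g x []) y "" = cellN g x.toNat y.toNat := by
          rw [PySem.List.pyGetD_of_nonneg _ _ hx0, PySem.List.pyGetD_of_nonneg _ _ hy0]; rfl
        rw [hcell]
        by_cases h4 : cellN g x.toNat y.toNat = "@"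
        · rw [if_pos h4, if_pos]
          rw [mem_atsOf]
          exact ⟨x.toNat, y.toNat,
            by simp [Int.toNat_of_nonneg hx0, Int.toNat_of_nonneg hy0], by omega, by omega,
            by omega, h4⟩
        · rw [if_neg h4, if_neg]
          intro hm
          rw [mem_atsOf] at hm
          obtain ⟨r', c', heq, -, -, -, hcell'⟩ := hm
          have hx : x = (r' : Int) := congrArg Prod.fst heq
          have hy : y = (c' : Int) := congrArg Prod.snd heq
          apply h4
          have hxr : x.toNat = r' := by omega
          have hyc : y.toNat = c' := by omega
          rw [hxr, hyc]; exact hcell'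
      · -- the probed slot is missing from its row: Python raises here (outside Pre_part2);
        -- the port's default "" and the clamped set agree on 0
        have hcell : PySem.List.pyGetD (PySem.List.pyGetD g x []) y "" = "" := by
          rw [PySem.List.pyGetD_of_nonneg _ _ hx0, PySem.List.pyGetD_of_nonneg _ _ hy0]
          exact List.getD_eq_default _ _ (by omega)
        rw [hcell, if_neg (by simp), if_neg]
        intro hm
        rw [mem_atsOf] at hm
        obtain ⟨r', c', heq, -, hc', -, -⟩ := hm
        have hx : x = (r' : Int) := congrArg Prod.fst heq
        have hy : y = (c' : Int) := congrArg Prod.snd heq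
        have hxr : x.toNat = r' := by omega
        rw [← hxr] at hc'
        omega

lemma nbA_eq_nbB (g : List (List String)) (r c : Int) :
    nbA g r c = nbB (atsOf g) r c := by
  have hc : ∀ q : Int × Int, (if PySem.Set.contains (atsOf g) q then (1:Int) else 0)
      = (if q ∈ atsOf g then 1 else 0) := by
    intro q
    by_cases hq : q ∈ atsOf g
    · rw [if_pos hq, if_pos ((PySem.Set.contains_iff _ _).mpr hq)]
    · rw [if_neg hq, if_neg (fun hb => hq ((PySem.Set.contains_iff _ _).mp hb))]
  simp only [nbA, nbB, offs, List.map_cons, List.map_nil, List.sum_cons, List.sum_nil,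
    checkNeighbor_eq g, hc, sub_eq_add_neg, add_zero]

lemma nbB_congr (ats ats' : PySem.Set (Int × Int)) (h : ∀ p, p ∈ ats ↔ p ∈ ats') (r c : Int) :
    nbB ats r c = nbB ats' r c := by
  have hc : ∀ q : Int × Int, PySem.Set.contains ats q = PySem.Set.contains ats' q := by
    intro q
    by_cases hq : q ∈ ats
    · rw [(PySem.Set.contains_iff _ _).mpr hq, (PySem.Set.contains_iff _ _).mpr ((h q).mp hq)]
    · have h1 : PySem.Set.contains ats q = false :=
        Bool.eq_false_iff.mpr (fun hb => hq ((PySem.Set.contains_iff _ _).mp hb))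
      have h2 : PySem.Set.contains ats' q = false :=
        Bool.eq_false_iff.mpr (fun hb => hq ((h q).mpr ((PySem.Set.contains_iff _ _).mp hb)))
      rw [h1, h2]
  simp only [nbB, hc]

lemma removalsOf_eq (g : List (List String)) :
    removalsOf g = (aliveOf g).filter (fun p => decide (nbA g p.1 p.2 < 4)) := by
  unfold removalsOf aliveOf
  rw [List.filter_flatMap]
  have hinner : ∀ (racc : List (Int × Int)) (rl : Int × List String),
      (PySem.List.enumerate rl.2).foldl (fun acc2 cc =>
        if cc.2 = "." then acc2
        else if nbA g rl.1 cc.1 < 4 then acc2 ++ [(rl.1, cc.1)] else acc2) racc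
      = racc ++ ((PySem.List.enumerate rl.2).filterMap (fun cc =>
          if cc.2 ≠ "." then some (rl.1, cc.1) else none)).filter
            (fun p => decide (nbA g p.1 p.2 < 4)) := by
    intro racc rl
    rw [PySem.List.foldl_congr_mem _ _
      (fun acc2 (cc : Int × String) =>
        if cc.2 ≠ "." ∧ nbA g rl.1 cc.1 < 4 then acc2 ++ [(rl.1, cc.1)] else acc2) _
      (fun acc2 cc _ => by
        by_cases h1 : cc.2 = "." <;> by_cases h2 : nbA g rl.1 cc.1 < 4 <;>
          simp [h1, h2])]
    rw [PySem.List.foldl_append_ite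
      (p := fun cc : Int × String => cc.2 ≠ "." ∧ nbA g rl.1 cc.1 < 4)
      (f := fun cc : Int × String => (rl.1, cc.1))]
    congr 1
    rw [List.filter_filterMap, ← filterMap_ite_eq_map_filter]
    refine List.filterMap_congr (fun cc _ => ?_)
    by_cases h1 : cc.2 = "." <;> by_cases h2 : nbA g rl.1 cc.1 < 4 <;>
      simp [h1, h2, Option.filter]
  rw [PySem.List.foldl_congr_mem _ _
    (fun acc rl => acc ++ ((PySem.List.enumerate rl.2).filterMap (fun cc =>
      if cc.2 ≠ "." then some (rl.1, cc.1) else none)).filter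
        (fun p => decide (nbA g p.1 p.2 < 4))) _
    (fun acc rl _ => hinner acc rl)]
  rw [PySem.List.foldl_append_eq_flatMap]
  rfl

lemma headD_eq_getD_zero {α : Type} (l : List α) (d : α) : l.headD d = l.getD 0 d := by
  cases l <;> rfl

lemma getD_set (g : List (List String)) (r : Nat) (v : List String) (r' : Nat) :
    (g.set r v).getD r' [] = if r = r' ∧ r < g.length then v else g.getD r' [] := by
  rw [List.getD_eq_getElem?_getD, List.getD_eq_getElem?_getD, List.getElem?_set]
  by_cases h1 : r = r'
  · subst h1
    by_cases h2 : r < g.length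
    · simp [h2]
    · simp [h2]
  · simp [h1]

-- one Python assignment input[r][c] = '.'
lemma step_eq (g : List (List String)) (r c : Nat) :
    PySem.List.pySetD g ((r : Nat) : Int)
      (PySem.List.pySetD (PySem.List.pyGetD g ((r : Nat) : Int) []) ((c : Nat) : Int) ".")
      = g.set r ((g.getD r []).set c ".") := by
  rw [PySem.List.pyGetD_natCast, PySem.List.pySetD_natCast, PySem.List.pySetD_natCast]

-- shape of the grid after applying a round's removals
lemma applyRemovals_shape (rem : List (Int × Int)) (g : List (List String))
    (hrem : ∀ p ∈ rem, ∃ r c : Nat, p = ((r : Int), (c : Int)) ∧ r < g.length ∧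
      c < (g.getD r []).length) :
    (applyRemovals g rem).length = g.length ∧
      ∀ r : Nat, ((applyRemovals g rem).getD r []).length = (g.getD r []).length := by
  induction rem generalizing g with
  | nil => exact ⟨rfl, fun _ => rfl⟩
  | cons p t ih =>
    obtain ⟨r, c, rfl, hr, hc⟩ := hrem p (List.mem_cons_self)
    have hstep : applyRemovals g ((((r:Int)), ((c:Int))) :: t)
        = applyRemovals (g.set r ((g.getD r []).set c ".")) t := by
      unfold applyRemovals
      rw [List.foldl_cons]
      dsimp only
      rw [step_eq]
    set g1 := g.set r ((g.getD r []).set c ".") with hg1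
    have hlen1 : g1.length = g.length := by simp [hg1]
    have hrow1 : ∀ r' : Nat, (g1.getD r' []).length = (g.getD r' []).length := by
      intro r'
      rw [hg1, getD_set]
      by_cases h : r = r' ∧ r < g.length
      · rw [if_pos h, List.length_set, h.1]
      · rw [if_neg h]
    have ht : ∀ q ∈ t, ∃ r' c' : Nat, q = ((r' : Int), (c' : Int)) ∧ r' < g1.length ∧
        c' < (g1.getD r' []).length := by
      intro q hq
      obtain ⟨r', c', rfl, h1, h2⟩ := hrem q (List.mem_cons_of_mem _ hq)
      exact ⟨r', c', rfl, by omega, by rw [hrow1]; exact h2⟩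
    obtain ⟨ih1, ih2⟩ := ih g1 ht
    refine ⟨hstep ▸ (ih1.trans hlen1), fun r' => ?_⟩
    rw [hstep, ih2 r', hrow1 r']

lemma applyRemovals_cell (rem : List (Int × Int)) (g : List (List String))
    (hrem : ∀ p ∈ rem, ∃ r c : Nat, p = ((r : Int), (c : Int)) ∧ r < g.length ∧
      c < (g.getD r []).length) :
    ∀ r c : Nat, r < g.length → c < (g.getD r []).length →
      cellN (applyRemovals g rem) r c =
        if ((r : Int), (c : Int)) ∈ rem then "." else cellN g r c := by
  induction rem generalizing g with
  | nil => intro r c _ _; simp [applyRemovals]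
  | cons p t ih =>
    obtain ⟨pr, pc, rfl, hpr, hpc⟩ := hrem p (List.mem_cons_self)
    intro r c hrl hcl
    have hstep : applyRemovals g ((((pr:Int)), ((pc:Int))) :: t)
        = applyRemovals (g.set pr ((g.getD pr []).set pc ".")) t := by
      unfold applyRemovals
      rw [List.foldl_cons]
      dsimp only
      rw [step_eq]
    set g1 := g.set pr ((g.getD pr []).set pc ".") with hg1
    have hlen1 : g1.length = g.length := by simp [hg1]
    have hrow1 : ∀ r' : Nat, (g1.getD r' []).length = (g.getD r' []).length := by
      intro r'
      rw [hg1, getD_set]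
      by_cases h : pr = r' ∧ pr < g.length
      · rw [if_pos h, List.length_set, h.1]
      · rw [if_neg h]
    have ht : ∀ q ∈ t, ∃ r' c' : Nat, q = ((r' : Int), (c' : Int)) ∧ r' < g1.length ∧
        c' < (g1.getD r' []).length := by
      intro q hq
      obtain ⟨r', c', rfl, h1, h2⟩ := hrem q (List.mem_cons_of_mem _ hq)
      exact ⟨r', c', rfl, by omega, by rw [hrow1]; exact h2⟩
    have hcell1 : cellN g1 r c = if pr = r ∧ pc = c then "." else cellN g r c := by
      unfold cellN
      rw [hg1, getD_set]
      by_cases h1 : pr = r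
      · subst h1
        rw [if_pos ⟨rfl, hpr⟩]
        by_cases h2 : pc = c
        · subst h2
          rw [if_pos ⟨rfl, rfl⟩, List.getD_eq_getElem _ _ (by simpa using hcl),
            List.getElem_set, if_pos rfl]
        · rw [if_neg (by tauto), List.getD_eq_getElem _ _ (by simpa using hcl),
            List.getElem_set, if_neg h2, List.getD_eq_getElem _ _ hcl]
      · rw [if_neg (by tauto), if_neg (by tauto)]
    rw [hstep, ih g1 ht r c (by omega) (by rw [hrow1]; exact hcl), hcell1]
    by_cases h1 : ((r:Int), (c:Int)) ∈ t
    · rw [if_pos h1, if_pos (List.mem_cons_of_mem _ h1)]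
    · rw [if_neg h1]
      by_cases h2 : pr = r ∧ pc = c
      · rw [if_pos h2, if_pos (by rw [h2.1, h2.2]; exact List.mem_cons_self)]
      · rw [if_neg h2, if_neg]
        intro hmem
        rcases List.mem_cons.mp hmem with h | h
        · have h1' : (pr : Int) = (r : Int) := (congrArg Prod.fst h).symm
          have h2' : (pc : Int) = (c : Int) := (congrArg Prod.snd h).symm
          exact h2 ⟨by exact_mod_cast h1', by exact_mod_cast h2'⟩
        · exact h1 h

lemma mem_alive_idx (g : List (List String)) (rem : List (Int × Int))
    (hrem : ∀ p ∈ rem, p ∈ aliveOf g) :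
    ∀ p ∈ rem, ∃ r c : Nat, p = ((r : Int), (c : Int)) ∧ r < g.length ∧
      c < (g.getD r []).length := by
  intro p hp
  obtain ⟨r, c, rfl, h1, h2, -⟩ := (mem_aliveOf g p).mp (hrem p hp)
  exact ⟨r, c, rfl, h1, h2⟩

lemma applyRemovals_alive (g : List (List String)) (rem : List (Int × Int))
    (hrem : ∀ p ∈ rem, p ∈ aliveOf g) :
    aliveOf (applyRemovals g rem) = (aliveOf g).filter (fun p => decide (p ∉ rem)) := by
  have hrem' := mem_alive_idx g rem hrem
  obtain ⟨hlen, hrow⟩ := applyRemovals_shape rem g hrem'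
  have hcell := applyRemovals_cell rem g hrem'
  rw [aliveOf_eq_idx, aliveOf_eq_idx]
  unfold aliveIdx
  rw [List.filter_flatMap]
  rw [show PySem.List.pyRange 0 (PySem.List.len (applyRemovals g rem))
      = PySem.List.pyRange 0 (PySem.List.len g) by
    rw [PySem.List.len_eq, PySem.List.len_eq, hlen]]
  refine List.flatMap_congr (fun r hrmem => ?_)
  rw [PySem.List.mem_pyRange_one] at hrmem
  obtain ⟨hr0, hrlt⟩ := hrmem
  obtain ⟨rn, rfl⟩ : ∃ m : Nat, r = (m : Int) := ⟨r.toNat, (Int.toNat_of_nonneg hr0).symm⟩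
  rw [List.filter_filterMap]
  simp only [PySem.List.pyGetD_natCast]
  have hrn : rn < g.length := by
    rw [PySem.List.len_eq] at hrlt; exact_mod_cast hrlt
  rw [show PySem.List.len ((applyRemovals g rem).getD rn [])
      = PySem.List.len (g.getD rn []) by
    rw [PySem.List.len_eq, PySem.List.len_eq, hrow rn]]
  refine List.filterMap_congr (fun c hcmem => ?_)
  rw [PySem.List.mem_pyRange_one] at hcmem
  obtain ⟨hc0, hclt⟩ := hcmem
  obtain ⟨cn, rfl⟩ : ∃ m : Nat, c = (m : Int) := ⟨c.toNat, (Int.toNat_of_nonneg hc0).symm⟩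
  simp only [PySem.List.pyGetD_natCast]
  have hcn : cn < (g.getD rn []).length := by
    rw [PySem.List.len_eq] at hclt; exact_mod_cast hclt
  have hc := hcell rn cn hrn hcn
  unfold cellN at hc
  simp only [List.getD_eq_getElem?_getD] at hc ⊢
  rw [hc]
  by_cases hm : ((rn : Int), (cn : Int)) ∈ rem
  · rw [if_pos hm]
    by_cases hdot : (g[rn]?.getD [])[cn]?.getD "" = "."
    · simp [hdot]
    · simp [hdot, Option.filter, hm]
  · rw [if_neg hm]
    by_cases hdot : (g[rn]?.getD [])[cn]?.getD "" = "."
    · simp [hdot]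
    · simp [hdot, Option.filter, hm]

lemma applyRemovals_ats (g : List (List String)) (rem : List (Int × Int))
    (hrem : ∀ p ∈ rem, p ∈ aliveOf g) (p : Int × Int) :
    p ∈ atsOf (applyRemovals g rem) ↔ p ∈ atsOf g ∧ p ∉ rem := by
  have hrem' := mem_alive_idx g rem hrem
  obtain ⟨hlen, hrow⟩ := applyRemovals_shape rem g hrem'
  have hcell := applyRemovals_cell rem g hrem'
  have hW : ((applyRemovals g rem).headD []).length = (g.headD []).length := by
    rw [headD_eq_getD_zero, headD_eq_getD_zero, hrow 0]
  rw [mem_atsOf, mem_atsOf]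
  constructor
  · rintro ⟨r, c, rfl, hr, hc, hcW, hcp⟩
    have hr' : r < g.length := by omega
    have hc' : c < (g.getD r []).length := by rw [← hrow r]; exact hc
    have h := hcell r c hr' hc'
    by_cases hm : ((r : Int), (c : Int)) ∈ rem
    · rw [if_pos hm] at h
      rw [hcp] at h
      exact absurd h (by simp)
    · rw [if_neg hm] at h
      exact ⟨⟨r, c, rfl, hr', hc', by omega, h ▸ hcp⟩, hm⟩
  · rintro ⟨⟨r, c, rfl, hr, hc, hcW, hcp⟩, hm⟩
    refine ⟨r, c, rfl, by omega, by rw [hrow r]; exact hc, by omega, ?_⟩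
    rw [hcell r c hr hc, if_neg hm]
    exact hcp

lemma aliveOf_length_le (g : List (List String)) :
    (aliveOf g).length ≤ (g.map List.length).sum := by
  suffices h : ∀ (g : List (List String)) (s : Int),
      ((PySem.List.enumerate g s).flatMap (fun rl =>
        (PySem.List.enumerate rl.2).filterMap (fun cc =>
          if cc.2 ≠ "." then some (rl.1, cc.1) else none))).length ≤ (g.map List.length).sum by
    exact h g 0
  intro g
  induction g with
  | nil => intro s; simp [PySem.List.enumerate_nil]
  | cons row t ih =>
    intro s
    rw [PySem.List.enumerate_cons]
    simp only [List.flatMap_cons, List.length_append, List.map_cons, List.sum_cons]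
    have h1 := List.length_filterMap_le (fun cc : Int × String =>
      if cc.2 ≠ "." then some (s, cc.1) else none) (PySem.List.enumerate row)
    rw [PySem.List.length_enumerate] at h1
    exact Nat.add_le_add h1 (ih (s + 1))

lemma loop_agree (n : Nat) :
    ∀ (g : List (List String)) (ats : PySem.Set (Int × Int)) (total : Int) (fa fb : Nat),
      (∀ p, p ∈ ats ↔ p ∈ atsOf g) →
      (aliveOf g).length ≤ n → (aliveOf g).length < fa → (aliveOf g).length < fb →
      part2Loop fa g total = roundLoop fb (aliveOf g) ats total := by
  induction n using Nat.strong_induction_on with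
  | _ n ih =>
  intro g ats total fa fb hats hn hfa hfb
  obtain ⟨fa', rfl⟩ : ∃ m, fa = m + 1 := ⟨fa - 1, by omega⟩
  obtain ⟨fb', rfl⟩ : ∃ m, fb = m + 1 := ⟨fb - 1, by omega⟩
  simp only [part2Loop, roundLoop]
  have hremA : removalsOf g = (aliveOf g).filter (fun p => decide (nbB ats p.1 p.2 < 4)) := by
    rw [removalsOf_eq]
    exact List.filter_congr (fun p hp => decide_eq_decide.mpr (by
      rw [nbA_eq_nbB g, nbB_congr (atsOf g) ats (fun q => (hats q).symm)]))
  rw [hremA]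
  set R := (aliveOf g).filter (fun p => decide (nbB ats p.1 p.2 < 4)) with hRdef
  by_cases hAE : (aliveOf g).isEmpty = true
  · have hAnil : aliveOf g = [] := List.isEmpty_iff.mp hAE
    have hRnil : R = [] := by rw [hRdef, hAnil]; rfl
    simp [hAE, hRnil]
  · rw [if_neg hAE]
    by_cases hRnil : R = []
    · simp [hRnil]
    · rw [if_neg (by simpa using hRnil), if_neg (by simp [List.isEmpty_iff, hRnil])]
      have hsub : ∀ p ∈ R, p ∈ aliveOf g := fun p hp => (List.mem_filter.mp hp).1
      have hndR : R.Nodup := (nodup_aliveOf g).filter _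
      have hof : PySem.Set.ofList R = R := PySem.Set.ofList_eq_self_of_nodup R hndR
      rw [hof]
      have halive' : (aliveOf g).filter (fun p => !(PySem.Set.contains R p))
          = aliveOf (applyRemovals g R) := by
        rw [applyRemovals_alive g R hsub]
        refine List.filter_congr (fun p _ => ?_)
        by_cases h : p ∈ R
        · simp [h]
        · have hc : PySem.Set.contains R p = false :=
            Bool.eq_false_iff.mpr (fun hb => h ((PySem.Set.contains_iff R p).mp hb))
          simp [h]
      rw [halive']
      have hlt : (aliveOf (applyRemovals g R)).length < (aliveOf g).length := by
        rw [applyRemovals_alive g R hsub]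
        apply List.length_filter_lt_length_iff_exists.mpr
        obtain ⟨p, hp⟩ := List.exists_mem_of_ne_nil R hRnil
        exact ⟨p, hsub p hp, by simp [hp]⟩
      exact ih (aliveOf (applyRemovals g R)).length (by omega)
        (applyRemovals g R) (PySem.Set.diff ats R) (total + (R.length : Int)) fa' fb'
        (fun p => by rw [PySem.Set.mem_diff, applyRemovals_ats g R hsub p, hats p])
        (by omega) (by omega) (by omega)

-- ===== the peeling core: both processes compute the greatest 4-closed subset of the '@' set =====

def ClosedSet (T : PySem.Set (Int × Int)) : Prop := ∀ p ∈ T, 4 ≤ nbB T p.1 p.2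

def SubOf (T U : List (Int × Int)) : Prop := ∀ p ∈ T, p ∈ U

-- T is the greatest subset of ats in which every cell keeps ≥ 4 neighbors
def GreatestClosed (T ats : PySem.Set (Int × Int)) : Prop :=
  SubOf T ats ∧ ClosedSet T ∧
    ∀ U : PySem.Set (Int × Int), SubOf U ats → ClosedSet U → SubOf U T

lemma nbB_mono (S S' : PySem.Set (Int × Int)) (h : SubOf S S') (r c : Int) :
    nbB S r c ≤ nbB S' r c := by
  unfold nbB
  refine List.sum_le_sum (fun d _ => ?_)
  by_cases hq : PySem.Set.contains S (r + d.1, c + d.2) = true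
  · rw [hq, (PySem.Set.contains_iff _ _).mpr (h _ ((PySem.Set.contains_iff _ _).mp hq))]
  · rw [Bool.eq_false_iff.mpr hq, if_neg (by simp : ¬ (false = true))]
    split <;> omega

lemma length_filter_add_length_filter_not {α : Type} (l : List α) (p : α → Bool) :
    (l.filter p).length + (l.filter (fun a => !(p a))).length = l.length := by
  induction l with
  | nil => rfl
  | cons x t ih => by_cases h : p x <;> simp [h, ← ih] <;> omega

-- the round process computes B's closed-form answer, for ANY greatest closed set T
lemma roundLoop_eq (n : Nat) :
    ∀ (alive : List (Int × Int)) (ats : PySem.Set (Int × Int)) (total : Int)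
      (T : PySem.Set (Int × Int)),
      alive.Nodup → SubOf ats alive → GreatestClosed T ats → alive.length < n →
      roundLoop n alive ats total
        = total + (alive.length : Int)
          - ((alive.filter (fun p => decide (4 ≤ nbB T p.1 p.2))).length : Int) := by
  induction n using Nat.strong_induction_on with
  | _ n ih =>
  intro alive ats total T hnd hsub hT hfn
  obtain ⟨f, rfl⟩ : ∃ m, n = m + 1 := ⟨n - 1, by omega⟩
  obtain ⟨hTsub, hTcl, hTmax⟩ := hT
  simp only [roundLoop]
  by_cases hAE : alive.isEmpty = true
  · have : alive = [] := List.isEmpty_iff.mp hAE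
    subst this
    simp
  · rw [if_neg hAE]
    set rem := alive.filter (fun p => decide (nbB ats p.1 p.2 < 4)) with hrem
    by_cases hRE : rem.isEmpty = true
    · rw [if_pos hRE]
      -- no removals: ats is closed, hence ats ⊆ T ⊆ ats, and every alive cell survives
      have hnone : ∀ p ∈ alive, ¬ (nbB ats p.1 p.2 < 4) := by
        intro p hp hlt
        have : p ∈ rem := List.mem_filter.mpr ⟨hp, by simpa using hlt⟩
        rw [List.isEmpty_iff.mp hRE] at this
        simp at this
      have hclats : ClosedSet ats := fun p hp => by
        have := hnone p (hsub p hp)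
        omega
      have hmemTA : ∀ p, p ∈ T ↔ p ∈ ats :=
        fun p => ⟨fun h => hTsub p h, fun h => hTmax ats (fun q hq => hq) hclats p h⟩
      have hall : alive.filter (fun p => decide (4 ≤ nbB T p.1 p.2)) = alive := by
        refine List.filter_eq_self.mpr (fun p hp => ?_)
        have := hnone p hp
        rw [decide_eq_true_eq, nbB_congr T ats hmemTA]
        omega
      rw [hall]
      ring
    · rw [if_neg hRE]
      have hsubR : ∀ p ∈ rem, p ∈ alive := fun p hp => (List.mem_filter.mp hp).1
      have hndR : rem.Nodup := hnd.filter _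
      rw [PySem.Set.ofList_eq_self_of_nodup rem hndR]
      set alive' := alive.filter (fun p => !(PySem.Set.contains rem p)) with halive'
      -- over alive, membership in rem is exactly the removal test
      have hcontains : ∀ p, PySem.Set.contains rem p = true ↔ p ∈ rem := fun p =>
        ⟨fun h => (PySem.Set.contains_iff _ _).mp h, fun h => (PySem.Set.contains_iff _ _).mpr h⟩
      have halive'2 : alive' = alive.filter (fun p => !(decide (nbB ats p.1 p.2 < 4))) := by
        rw [halive']
        refine List.filter_congr (fun p hp => ?_)
        by_cases h : nbB ats p.1 p.2 < 4
        · have : p ∈ rem := List.mem_filter.mpr ⟨hp, by simpa using h⟩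
          rw [(hcontains p).mpr this]
          simp [h]
        · have : p ∉ rem := fun hc => h (by simpa using (List.mem_filter.mp hc).2)
          rw [Bool.eq_false_iff.mpr (fun hb => this ((hcontains p).mp hb))]
          simp [h]
      -- T avoids rem: removed cells have < 4 live neighbors, T-cells have ≥ 4
      have hTrem : ∀ p ∈ T, p ∉ rem := by
        intro p hp hc
        have h1 : nbB ats p.1 p.2 < 4 := by simpa using (List.mem_filter.mp hc).2
        have h2 : 4 ≤ nbB T p.1 p.2 := hTcl p hp
        have h3 := nbB_mono T ats hTsub p.1 p.2
        omega
      -- the survivor filters over alive and alive' coincide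
      have hsurv : alive'.filter (fun p => decide (4 ≤ nbB T p.1 p.2))
          = alive.filter (fun p => decide (4 ≤ nbB T p.1 p.2)) := by
        rw [halive', List.filter_filter]
        refine List.filter_congr (fun p hp => ?_)
        by_cases h : 4 ≤ nbB T p.1 p.2
        · have hps : p ∉ rem := by
            intro hc
            have h1 : nbB ats p.1 p.2 < 4 := by simpa using (List.mem_filter.mp hc).2
            have h3 := nbB_mono T ats hTsub p.1 p.2
            -- p survives in T hence has ≥ 4 neighbors already in ats
            have h4 : 4 ≤ nbB ats p.1 p.2 := le_trans h h3
            omega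
          simp [h, hps]
        · simp [h]
      -- lengths: |alive| = |rem| + |alive'|
      have hlen : rem.length + alive'.length = alive.length := by
        rw [halive'2, hrem]
        exact length_filter_add_length_filter_not alive _
      have hlt : alive'.length < alive.length := by
        have hne : rem ≠ [] := fun h => by simp [h] at hRE
        obtain ⟨p, hp⟩ := List.exists_mem_of_ne_nil rem hne
        have := List.length_pos_of_mem hp
        omega
      -- IH on the shrunk state, with the same T
      have hT' : GreatestClosed T (PySem.Set.diff ats rem) := by
        refine ⟨fun p hp => ?_, hTcl, fun U hU hUc p hp => ?_⟩
        · rw [PySem.Set.mem_diff]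
          exact ⟨hTsub p hp, hTrem p hp⟩
        · exact hTmax U (fun q hq => ((PySem.Set.mem_diff _ _ _).mp (hU q hq)).1) hUc p hp
      have hsub' : SubOf (PySem.Set.diff ats rem) alive' := by
        intro p hp
        rw [PySem.Set.mem_diff] at hp
        rw [halive']
        refine List.mem_filter.mpr ⟨hsub p hp.1, ?_⟩
        simp only [Bool.not_eq_eq_eq_not, Bool.not_true]
        exact Bool.eq_false_iff.mpr (fun hb => hp.2 ((hcontains p).mp hb))
      rw [ih f (by omega) alive' (PySem.Set.diff ats rem) (total + (rem.length : Int)) T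
        (hnd.filter _) hsub' hT' (by omega), hsurv]
      have : ((alive.filter (fun p => decide (4 ≤ nbB T p.1 p.2))).length : Int)
          ≤ (alive.length : Int) := by
        exact_mod_cast List.length_filter_le _ _
      push_cast [← hlen]
      ring

-- membership-preserving facts about Set.discard used by the peel invariant
lemma contains_discard_of_ne (S : PySem.Set (Int × Int)) (p x : Int × Int) (h : x ≠ p) :
    PySem.Set.contains (PySem.Set.discard S p) x = PySem.Set.contains S x := by
  by_cases hx : x ∈ S
  · rw [(PySem.Set.contains_iff _ _).mpr ((PySem.Set.mem_discard _ _ _).mpr ⟨hx, h⟩),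
      (PySem.Set.contains_iff _ _).mpr hx]
  · rw [Bool.eq_false_iff.mpr (fun hb => hx ((PySem.Set.mem_discard _ _ _).mp
        ((PySem.Set.contains_iff _ _).mp hb)).1),
      Bool.eq_false_iff.mpr (fun hb => hx ((PySem.Set.contains_iff _ _).mp hb))]

-- if removing p lowered q's count, then p is one of q's 8 neighbors
lemma nbB_discard_drop (S : PySem.Set (Int × Int)) (p q : Int × Int)
    (h : nbB (PySem.Set.discard S p) q.1 q.2 < nbB S q.1 q.2) :
    ∃ d ∈ offs, (q.1 + d.1, q.2 + d.2) = p := by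
  by_contra hno
  push Not at hno
  have : nbB (PySem.Set.discard S p) q.1 q.2 = nbB S q.1 q.2 := by
    unfold nbB
    refine congrArg List.sum (List.map_congr_left (fun d hd => ?_))
    rw [contains_discard_of_ne S p _ (hno d hd)]
  omega

lemma length_discard_of_mem (S : PySem.Set (Int × Int)) (p : Int × Int)
    (hnd : S.Nodup) (hp : p ∈ S) :
    (PySem.Set.discard S p).length + 1 = S.length := by
  have hperm : (PySem.Set.discard S p).Perm (S.erase p) := by
    refine (List.perm_ext_iff_of_nodup (PySem.Set.nodup_discard S p hnd) (hnd.erase p)).mpr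
      (fun x => ?_)
    rw [PySem.Set.mem_discard, hnd.mem_erase_iff]
    tauto
  rw [hperm.length_eq, List.length_erase_of_mem hp]
  have := List.length_pos_of_mem hp
  omega

-- the worklist peeling returns the greatest closed subset of the initial set
lemma peelLoop_greatest (ats0 : PySem.Set (Int × Int)) (n : Nat) :
    ∀ (S : PySem.Set (Int × Int)) (work : List (Int × Int)),
      S.Nodup → SubOf S ats0 →
      (∀ p ∈ S, nbB S p.1 p.2 < 4 → p ∈ work) →
      (∀ U : PySem.Set (Int × Int), SubOf U ats0 → ClosedSet U → SubOf U S) →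
      9 * S.length + work.length < n →
      GreatestClosed (peelLoop n S work) ats0 := by
  induction n using Nat.strong_induction_on with
  | _ n ih =>
  intro S work hnd hsub hqueued hmax hfn
  obtain ⟨f, rfl⟩ : ∃ m, n = m + 1 := ⟨n - 1, by omega⟩
  match work with
  | [] =>
    -- empty worklist: S itself is closed, and it is maximal by the invariant
    rw [show peelLoop (f+1) S [] = S from rfl]
    refine ⟨hsub, fun p hp => ?_, hmax⟩
    by_contra hlt
    exact absurd (hqueued p hp (by omega)) (by simp)
  | p :: rest =>
    simp only [peelLoop]
    simp only [List.length_cons] at hfn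
    by_cases hcp : PySem.Set.contains S p = false
    · rw [if_pos hcp]
      refine ih f (by omega) S rest hnd hsub (fun q hq hlt => ?_) hmax (by omega)
      have hq' := hqueued q hq hlt
      have hqp : q ≠ p := fun h => by
        rw [h] at hq
        exact absurd ((PySem.Set.contains_iff _ _).mpr hq) (by rw [hcp]; simp)
      rcases List.mem_cons.mp hq' with h | h
      · exact absurd h hqp
      · exact h
    · rw [if_neg hcp]
      have hpS : p ∈ S := (PySem.Set.contains_iff _ _).mp (Bool.not_eq_false _ ▸ hcp)
      by_cases hge : 4 ≤ nbB S p.1 p.2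
      · rw [if_pos hge]
        refine ih f (by omega) S rest hnd hsub (fun q hq hlt => ?_) hmax (by omega)
        have hq' := hqueued q hq hlt
        have hqp : q ≠ p := fun h => by rw [h] at hlt; omega
        rcases List.mem_cons.mp hq' with h | h
        · exact absurd h hqp
        · exact h
      · rw [if_neg hge]
        set S' := PySem.Set.discard S p with hS'
        set pushes := offs.filterMap (fun d =>
          if PySem.Set.contains S' (p.1 + d.1, p.2 + d.2) then some (p.1 + d.1, p.2 + d.2)
          else none) with hpushes
        have hmemS' : ∀ x, x ∈ S' ↔ x ∈ S ∧ x ≠ p := fun x => PySem.Set.mem_discard S p x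
        refine ih f (by omega) S' (rest ++ pushes) (PySem.Set.nodup_discard S p hnd)
          (fun q hq => hsub q ((hmemS' q).mp hq).1) (fun q hq hlt => ?_) (fun U hU hUc q hq => ?_) ?_
        · -- every under-supported cell of S' is still queued
          obtain ⟨hqS, hqp⟩ := (hmemS' q).mp hq
          by_cases hold : nbB S q.1 q.2 < 4
          · have := hqueued q hqS hold
            rcases List.mem_cons.mp this with h | h
            · exact absurd h hqp
            · exact List.mem_append_left _ h
          · -- q's count dropped when p was removed, so q is p's neighbor and was pushed
            have hdrop : nbB S' q.1 q.2 < nbB S q.1 q.2 := by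
              have := nbB_mono S' S (fun x hx => ((hmemS' x).mp hx).1) q.1 q.2
              omega
            obtain ⟨d, hd, hdp⟩ := nbB_discard_drop S p q hdrop
            refine List.mem_append_right _ ?_
            rw [hpushes]
            -- the reverse offset carries p back to q
            have hd' : (-d.1, -d.2) ∈ offs := by
              simp only [offs, List.mem_cons, List.not_mem_nil, or_false] at hd
              rcases hd with rfl|rfl|rfl|rfl|rfl|rfl|rfl|rfl <;> decide
            refine List.mem_filterMap.mpr ⟨(-d.1, -d.2), hd', ?_⟩
            have hq1 : p.1 + -d.1 = q.1 := by
              have := congrArg Prod.fst hdp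
              simp at this
              omega
            have hq2 : p.2 + -d.2 = q.2 := by
              have := congrArg Prod.snd hdp
              simp at this
              omega
            rw [hq1, hq2, if_pos ((PySem.Set.contains_iff _ _).mpr (by
              rw [show (q.1, q.2) = q from rfl]
              exact hq))]
        · -- closed subsets never contain the removed cell
          have hUS := hmax U hU hUc
          have hqp : q ≠ p := by
            intro h
            subst h
            have h1 : 4 ≤ nbB U q.1 q.2 := hUc q hq
            have h2 := nbB_mono U S hUS q.1 q.2
            omega
          exact (hmemS' q).mpr ⟨hUS q hq, hqp⟩
        · -- the measure 9|S| + |work| strictly decreases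
          have hS'len := length_discard_of_mem S p hnd hpS
          rw [← hS'] at hS'len
          have hpl : pushes.length ≤ 8 := by
            rw [hpushes]
            exact le_trans (List.length_filterMap_le _ _) (by simp [offs])
          simp only [List.length_append]
          omega

-- the peeled set B computes, and the facts needed about it
lemma peeled_greatest (g : List (List String)) :
    GreatestClosed
      (peelLoop (10 * (atsListOf g).length + 1) (PySem.Set.ofList (atsListOf g)) (atsListOf g))
      (atsOf g) := by
  have hle := PySem.Set.length_ofList_le (atsListOf g)
  refine peelLoop_greatest (atsOf g) _ (PySem.Set.ofList (atsListOf g)) (atsListOf g)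
    (PySem.Set.nodup_ofList _) (fun p hp => hp) (fun p hp _ => ?_) (fun U hU _ => hU) (by omega)
  exact (PySem.Set.mem_ofList _ _).mp hp

-- the '@' set sits inside the alive set ('@' ≠ '.')
lemma ats_sub_alive (g : List (List String)) : SubOf (atsOf g) (aliveOf g) := by
  intro p hp
  obtain ⟨r, c, rfl, hr, hc, -, hcell⟩ := (mem_atsOf g p).mp hp
  exact (mem_aliveOf g _).mpr ⟨r, c, rfl, hr, hc, by rw [hcell]; decide⟩

-- ===== VERDICT (by name: the statement is the Claim_ definition above) =====
theorem part2_spec : Claim_equal_part2 := by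
  intro input _hdom _hpre
  unfold Spec_part2
  have h1 : part2 input
      = roundLoop ((aliveOf input).length + 1) (aliveOf input) (atsOf input) 0 := by
    unfold part2
    exact loop_agree (aliveOf input).length input (atsOf input) 0 _ _
      (fun p => Iff.rfl) le_rfl (Nat.lt_succ_of_le (aliveOf_length_le input))
      (Nat.lt_succ_self _)
  rw [h1, roundLoop_eq ((aliveOf input).length + 1) (aliveOf input) (atsOf input) 0 _
    (nodup_aliveOf input) (ats_sub_alive input) (peeled_greatest input) (Nat.lt_succ_self _)]
  unfold part2_alt
  ring
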